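-- pv_equiv track=rewrite | github.com/steven-p-walsh/hebbianllm | experiments/conversational_learning/utils/tokenizer.py | create_training_pairs
-- ===== SOURCE A (Python) =====
-- from typing import List, Dict, Tuple, Optional
--
-- def create_training_pairs(token_ids: List[int],
--                         context_length: int = 10) -> List[Tuple[List[int], int]]:
--     """
--     Create input-target pairs for training.
--
--     Args:
--         token_ids: Full sequence of token IDs
--         context_length: Length of context window
--
--     Returns:
--         List of (context, target) pairs
--     """
--     pairs = []
--
--     for i in range(context_length, len(token_ids)):
--         context = token_ids[i-context_length:i]
--         target = token_ids[i]
--         pairs.append((context, target))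
--
--     return pairs
-- ===== SOURCE B (Python) =====
-- from typing import List, Tuple
--
-- def create_training_pairs(token_ids: List[int],
--                         context_length: int = 10) -> List[Tuple[List[int], int]]:
--     """Build the windows by transposing shifted copies of the sequence."""
--     if context_length < 0 or context_length >= len(token_ids):
--         return []  # no full (context, target) window exists
--     shifted = (token_ids[j:] for j in range(context_length + 1))
--     return [(list(w[:-1]), w[-1]) for w in zip(*shifted)]
-- ===== Notes on version B (the rewrite author's own statement) =====
-- stated objective: idiomatic
-- what changed: B builds the windows by transposing context_length+1 shifted copies of the sequence (zip of offset slices) instead of indexing a fresh slice per position i.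
-- intended difference: For negative context_length that A survives, A returns one pair per position with negative-index wraparound targets and clipped contexts, an accident of Python range/slice semantics; B returns an empty list, the intended result for a nonsensical negative window size. — e.g. on create_training_pairs([1, 2, 3], -1): A returns [([1, 2], 3), ([], 1), ([], 2), ([], 3)], B returns []
import Mathlib
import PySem

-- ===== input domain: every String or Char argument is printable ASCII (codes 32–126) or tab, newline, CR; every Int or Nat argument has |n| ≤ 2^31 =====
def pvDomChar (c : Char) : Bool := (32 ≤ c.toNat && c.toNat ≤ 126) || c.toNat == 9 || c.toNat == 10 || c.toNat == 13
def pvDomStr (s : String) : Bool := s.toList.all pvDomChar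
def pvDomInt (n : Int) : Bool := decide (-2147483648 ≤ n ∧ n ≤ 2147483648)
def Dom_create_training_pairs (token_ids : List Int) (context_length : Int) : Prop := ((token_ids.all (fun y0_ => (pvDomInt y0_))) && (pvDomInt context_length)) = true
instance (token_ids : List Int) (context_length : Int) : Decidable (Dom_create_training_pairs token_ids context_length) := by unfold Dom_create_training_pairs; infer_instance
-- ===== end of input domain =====

-- B builds the pairs by transposing shifted copies of the sequence instead of slicing per index (idiomatic alternative; return values only).

-- ===== PORT A =====
-- literal transliteration of A's loop: for i in range(context_length, len): pairs.append((token_ids[i-cl:i], token_ids[i]))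
def create_training_pairs (token_ids : List Int) (context_length : Int) : List (List Int × Int) :=
  (PySem.List.pyRange context_length token_ids.length 1).foldl
    (fun pairs i =>
      let context := PySem.List.slice token_ids (some (i - context_length)) (some i)
      let target := PySem.List.pyGetD token_ids i 0   -- token_ids[i]; in range under Pre_
      pairs ++ [(context, target)]) []

-- ===== PORT B =====
-- zip(*iters): emit the head of each list, recurse on the tails, stop when any list is exhausted
-- (structural recursion on the first list; zip() of no iterables yields nothing)
def pvZipAux : List Int → List (List Int) → List (List Int)
  | [], _ => []
  | a :: as, rest =>
    if rest.all (fun l => !l.isEmpty) then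
      (a :: rest.map (fun l => l.headI)) :: pvZipAux as (rest.map List.tail)
    else []

def pvZipMany : List (List Int) → List (List Int)
  | [] => []
  | l :: rest => pvZipAux l rest

def create_training_pairs_alt (token_ids : List Int) (context_length : Int) : List (List Int × Int) :=
  if context_length < 0 ∨ (token_ids.length : Int) ≤ context_length then []   -- no full window exists
  else
  let shifted := (PySem.List.pyRange 0 (context_length + 1) 1).map
      (fun j => PySem.List.slice token_ids (some j) none)           -- token_ids[j:]
  (pvZipMany shifted).map
      (fun w => (PySem.List.slice w none (some (-1)),               -- list(w[:-1])
                 PySem.List.pyGetD w (-1) 0))                       -- w[-1]; rows are nonempty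

-- ===== PRECONDITION & SPEC =====
-- Pre_ excludes exactly the inputs where A raises IndexError: context_length < -len(token_ids)
def Pre_create_training_pairs (token_ids : List Int) (context_length : Int) : Prop :=
  -(token_ids.length : Int) ≤ context_length
instance (token_ids : List Int) (context_length : Int) : Decidable (Pre_create_training_pairs token_ids context_length) := by unfold Pre_create_training_pairs; infer_instance
def pvWitness_create_training_pairs : List Int × Int := ([1, 2, 3], 2)

-- For negative context_length that A survives, A returns one pair per position with negative-index
-- wraparound targets and clipped contexts, an accident of Python range/slice semantics; B returns an
-- empty list, the intended result for a nonsensical negative window size.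
def D_create_training_pairs (token_ids : List Int) (context_length : Int) : Prop :=
  context_length < 0
instance (token_ids : List Int) (context_length : Int) : Decidable (D_create_training_pairs token_ids context_length) := by unfold D_create_training_pairs; infer_instance

def Spec_create_training_pairs (token_ids : List Int) (context_length : Int) (out : List (List Int × Int)) : Prop :=
  ¬ D_create_training_pairs token_ids context_length → out = create_training_pairs_alt token_ids context_length
instance (token_ids : List Int) (context_length : Int) (out : List (List Int × Int)) : Decidable (Spec_create_training_pairs token_ids context_length out) := by unfold Spec_create_training_pairs; infer_instance

def pvDiffWitness_create_training_pairs : List Int × Int := ([1, 2, 3], -1)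
def pvDiffWitnessOut_create_training_pairs : (List (List Int × Int)) × (List (List Int × Int)) :=
  ([([1, 2], 3), ([], 1), ([], 2), ([], 3)], [])

-- ===== CLAIM (what is proved, stated in full; the proofs are below) =====
def Claim_unchanged_create_training_pairs : Prop := ∀ (token_ids : List Int) (context_length : Int), Dom_create_training_pairs token_ids context_length → Pre_create_training_pairs token_ids context_length → Spec_create_training_pairs token_ids context_length (create_training_pairs token_ids context_length)
def Claim_changed_create_training_pairs : Prop := Dom_create_training_pairs (pvDiffWitness_create_training_pairs.1) (pvDiffWitness_create_training_pairs.2) ∧ Pre_create_training_pairs (pvDiffWitness_create_training_pairs.1) (pvDiffWitness_create_training_pairs.2) ∧ D_create_training_pairs (pvDiffWitness_create_training_pairs.1) (pvDiffWitness_create_training_pairs.2) ∧ create_training_pairs (pvDiffWitness_create_training_pairs.1) (pvDiffWitness_create_training_pairs.2) = pvDiffWitnessOut_create_training_pairs.1 ∧ create_training_pairs_alt (pvDiffWitness_create_training_pairs.1) (pvDiffWitness_create_training_pairs.2) = pvDiffWitnessOut_create_training_pairs.2 ∧ pvDiffWitnessOut_create_training_pairs.1 ≠ pvDiffWitnessO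ut_create_training_pairs.2
def Claim_exact_create_training_pairs : Prop := ∀ (token_ids : List Int) (context_length : Int), Dom_create_training_pairs token_ids context_length → Pre_create_training_pairs token_ids context_length → D_create_training_pairs token_ids context_length → create_training_pairs token_ids context_length ≠ create_training_pairs_alt token_ids context_length

-- ===== LEMMAS AND PROOFS =====

-- heads of the shifted suffixes form the first window
theorem heads_of_shifts (t : List Int) (n : Nat) (hn : n ≤ t.length) :
    (List.range n).map (fun j => (t.drop j).headI) = t.take n := by
  apply List.ext_getElem
  · simp [hn]
  · intro i h1 h2
    simp only [List.getElem_map, List.getElem_range, List.getElem_take]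
    have hi : i < t.length := by simp at h1; omega
    rw [List.drop_eq_getElem_cons hi]
    rfl

theorem pvZipAux_shifts (t : List Int) (c : Nat) :
    pvZipAux t ((List.range c).map (fun j => t.drop (j + 1))) =
      (List.range (t.length - c)).map (fun k => (t.drop k).take (c + 1)) := by
  induction t with
  | nil => simp [pvZipAux]
  | cons x t' ih =>
    have hrest : (List.range c).map (fun j => (x :: t').drop (j + 1)) =
        (List.range c).map (fun j => t'.drop j) := by
      simp [List.drop_succ_cons]
    by_cases hc : c ≤ t'.length
    · have hall : ((List.range c).map (fun j => t'.drop j)).all (fun l => !l.isEmpty) = true := by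
        simp only [List.all_eq_true, List.mem_map, List.mem_range]
        rintro l ⟨j, hj, rfl⟩
        simp [List.drop_eq_nil_iff]; omega
      rw [hrest]
      simp only [pvZipAux, hall, if_pos]
      have htails : ((List.range c).map (fun j => t'.drop j)).map List.tail =
          (List.range c).map (fun j => t'.drop (j + 1)) := by
        simp [List.map_map, Function.comp_def, List.tail_drop]
      have hheads : ((List.range c).map (fun j => t'.drop j)).map (fun l => l.headI) =
          t'.take c := by
        rw [List.map_map]
        exact heads_of_shifts t' c hc
      rw [htails, ih, hheads]
      have hlen : (x :: t').length - c = (t'.length - c) + 1 := by simp; omega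
      rw [hlen, List.range_succ_eq_map]
      simp only [List.map_cons, List.map_map, Function.comp_def]
      refine List.cons_eq_cons.mpr ⟨by simp, ?_⟩
      apply List.map_congr_left
      intro k _
      simp [List.drop_succ_cons]
    · have hbad : ¬ (((List.range c).map (fun j => t'.drop j)).all (fun l => !l.isEmpty) = true) := by
        simp only [List.all_eq_true, List.mem_map, List.mem_range, not_forall]
        refine ⟨[], ⟨t'.length, by omega, by simp⟩, by simp⟩
      rw [hrest]
      simp only [pvZipAux, hbad, if_neg]
      have h0 : (x :: t').length - c = 0 := by simp; omega
      rw [h0]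
      simp

theorem pvZipMany_shifts (t : List Int) (c : Nat) :
    pvZipMany ((List.range (c + 1)).map (fun j => t.drop j)) =
      (List.range (t.length - c)).map (fun k => (t.drop k).take (c + 1)) := by
  rw [List.range_succ_eq_map]
  simp only [List.map_cons, List.drop_zero, List.map_map, Function.comp_def]
  show pvZipAux t _ = _
  rw [← pvZipAux_shifts t c]

-- A as a map over window start positions (Nat form of the context length)
theorem portA_eq_map (t : List Int) (c : Nat) :
    create_training_pairs t (c : Int) =
      (List.range (t.length - c)).map
        (fun k => ((t.drop k).take c, t.getD (k + c) (0 : Int))) := by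
  simp only [create_training_pairs]
  rw [PySem.List.foldl_append_singleton_eq_map
      (f := fun i => (PySem.List.slice t (some (i - (c : Int))) (some i),
                      PySem.List.pyGetD t i 0))]
  rw [PySem.List.pyRange_one]
  have hlen : ((t.length : Int) - (c : Int)).toNat = t.length - c := by omega
  rw [hlen, List.map_map, List.nil_append]
  apply List.map_congr_left
  intro k hk
  simp only [Function.comp_def]
  have h1 : (c : Int) + (k : Int) - (c : Int) = (k : Int) := by ring
  have h2 : (c : Int) + (k : Int) = (k : Int) + (c : Int) := by ring
  rw [h1, h2, PySem.List.slice_natCast_add]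
  have h3 : (k : Int) + (c : Int) = ((k + c : Nat) : Int) := by push_cast; ring
  rw [h3, PySem.List.pyGetD_natCast]

-- B as the same map
theorem portB_eq_map (t : List Int) (c : Nat) :
    create_training_pairs_alt t (c : Int) =
      (List.range (t.length - c)).map
        (fun k => ((t.drop k).take c, t.getD (k + c) (0 : Int))) := by
  by_cases hc : c < t.length
  case neg =>
    simp only [create_training_pairs_alt]
    rw [if_pos (by right; push_cast; omega)]
    have h0 : t.length - c = 0 := by omega
    rw [h0]
    simp
  case pos =>
  simp only [create_training_pairs_alt]
  rw [if_neg (by push_cast; omega)]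
  have h1 : (c : Int) + 1 = ((c + 1 : Nat) : Int) := by push_cast; ring
  rw [h1, PySem.List.pyRange_zero_natCast, List.map_map]
  have h2 : ((fun j => PySem.List.slice t (some j) none) ∘ fun k : Nat => ((k : Int))) =
      (fun j => t.drop j) := by
    funext j
    exact PySem.List.slice_from_natCast t j
  rw [h2, pvZipMany_shifts, List.map_map]
  apply List.map_congr_left
  intro k hk
  simp only [Function.comp_def, List.mem_range] at *
  have hklen : k + c < t.length := by omega
  have hwlen : ((t.drop k).take (c + 1)).length = c + 1 := by
    simp [List.length_take, List.length_drop]; omega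
  have hwne : (t.drop k).take (c + 1) ≠ [] := by
    intro h; rw [h] at hwlen; simp at hwlen
  refine Prod.ext ?_ ?_
  · rw [PySem.List.slice_to_neg_one, List.dropLast_eq_take, hwlen]
    simp [List.take_take]
  · rw [PySem.List.pyGetD_neg_one _ _ hwne, List.getLast_eq_getElem,
        List.getD_eq_getElem t 0 hklen]
    simp only [hwlen, Nat.add_sub_cancel]
    rw [List.getElem_take, List.getElem_drop]

theorem portA_ne_nil (t : List Int) (cl : Int) (h : cl < t.length) :
    create_training_pairs t cl ≠ [] := by
  simp only [create_training_pairs]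
  rw [PySem.List.foldl_append_singleton_eq_map
      (f := fun i => (PySem.List.slice t (some (i - cl)) (some i),
                      PySem.List.pyGetD t i 0))]
  simp only [List.nil_append, ne_eq, List.map_eq_nil_iff]
  intro hnil
  have := congrArg List.length hnil
  rw [PySem.List.length_pyRange_one] at this
  simp at this
  omega

-- ===== VERDICT (by name: the statement is the Claim_ definition above) =====
theorem create_training_pairs_spec : Claim_unchanged_create_training_pairs := by
  intro t cl _ _ hnd
  have h0 : 0 ≤ cl := by
    by_contra h; exact hnd (by unfold D_create_training_pairs; omega)
  obtain ⟨c, rfl⟩ := Int.eq_ofNat_of_zero_le h0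
  rw [portA_eq_map, portB_eq_map]

theorem create_training_pairs_changed : Claim_changed_create_training_pairs := by
  unfold Claim_changed_create_training_pairs; decide

theorem create_training_pairs_tight : Claim_exact_create_training_pairs := by
  intro t cl _ hpre hd heq
  unfold Pre_create_training_pairs at hpre
  unfold D_create_training_pairs at hd
  have hB : create_training_pairs_alt t cl = [] := by
    unfold create_training_pairs_alt
    rw [if_pos (by left; omega)]
  exact portA_ne_nil t cl (by omega) (heq.trans hB)
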